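-- pv_equiv track=rewrite | github.com/minahil-azaz/image-to-text-exraction | ocr_engine.py | _improve_paragraph_formatting
-- ===== SOURCE A (Python) =====
-- def _improve_paragraph_formatting(text):
--     """
--     Improve paragraph formatting for long text
--
--     Args:
--         text: Raw extracted text
--
--     Returns:
--         Formatted text with improved paragraph structure
--     """
--     if not text:
--         return text
--
--     # Split into lines
--     lines = text.split('\n')
--
--     # Clean and normalize lines
--     cleaned_lines = []
--     for line in lines:
--         line = line.strip()
--         if line:
--             # Remove excessive whitespace
--             line = ' '.join(line.split())
--             cleaned_lines.append(line)
--
--     # Group lines into paragraphs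
--     paragraphs = []
--     current_paragraph = []
--
--     for line in cleaned_lines:
--         # Check if this line might be a paragraph break
--         # (short line, ends with period, or has different characteristics)
--         is_paragraph_break = (
--             len(line) < 50 or  # Short line
--             line.endswith('.') or  # Ends with period
--             line.endswith('!') or  # Ends with exclamation
--             line.endswith('?') or  # Ends with question mark
--             line.isupper() or  # All caps (might be heading)
--             (len(line.split()) <= 3 and line.endswith('.'))  # Very short sentence
--         )
--
--         if is_paragraph_break and current_paragraph:
--             # End current paragraph
--             current_paragraph.append(line)
--             paragraphs.append(' '.join(current_paragraph))
--             current_paragraph = []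
--         else:
--             current_paragraph.append(line)
--
--     # Add remaining lines as last paragraph
--     if current_paragraph:
--         paragraphs.append(' '.join(current_paragraph))
--
--     # Join paragraphs with proper spacing
--     result = '\n\n'.join(paragraphs)
--
--     # Final cleanup
--     result = result.replace('\n\n\n', '\n\n')  # Remove excessive line breaks
--     result = result.strip()
--
--     return result
-- ===== SOURCE B (Python) =====
-- def _improve_paragraph_formatting(text):
--     if not text:
--         return text
--     cleaned = [' '.join(s.split())
--                for s in (line.strip() for line in text.split('\n')) if s]
--     flagged = [(s, _is_paragraph_break(s)) for s in cleaned]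
--     result = '\n\n'.join(_paragraphs(flagged))
--     result = result.replace('\n\n\n', '\n\n')
--     return result.strip()
--
--
-- def _is_paragraph_break(line):
--     return (len(line) < 50 or line.endswith('.') or line.endswith('!')
--             or line.endswith('?') or line.isupper()
--             or (len(line.split()) <= 3 and line.endswith('.')))
--
--
-- def _paragraphs(flagged):
--     """Recursively cut (line, is_break) pairs into paragraphs: a paragraph is
--     the first line plus following non-break lines, closed by the next break
--     line (if any)."""
--     if not flagged:
--         return []
--     head, rest = flagged[0][0], flagged[1:]
--     k = 0
--     while k < len(rest) and not rest[k][1]: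
--         k += 1
--     body = [p[0] for p in rest[:k + 1]]   # includes the closing break line, if present
--     return [' '.join([head] + body)] + _paragraphs(rest[k + 1:])
-- ===== Notes on version B (the rewrite author's own statement) =====
-- stated objective: alternative
-- what changed: Replaces A's stateful accumulator loop (paragraphs/current_paragraph mutated per line) with a two-phase decomposition: map the break predicate over the cleaned lines first, then recursively cut the flagged list into paragraphs by spanning to the next break line.
import Mathlib
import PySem

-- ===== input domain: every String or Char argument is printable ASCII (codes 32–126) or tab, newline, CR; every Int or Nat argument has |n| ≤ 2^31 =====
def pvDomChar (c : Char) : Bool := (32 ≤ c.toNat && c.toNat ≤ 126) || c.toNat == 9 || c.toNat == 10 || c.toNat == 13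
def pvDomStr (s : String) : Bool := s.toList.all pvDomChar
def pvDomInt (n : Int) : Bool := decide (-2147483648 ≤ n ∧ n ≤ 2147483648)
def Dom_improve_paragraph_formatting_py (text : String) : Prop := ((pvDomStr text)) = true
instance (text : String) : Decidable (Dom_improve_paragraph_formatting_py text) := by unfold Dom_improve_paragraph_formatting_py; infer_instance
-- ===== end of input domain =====

-- B replaces A's stateful paragraph accumulator with a flag-then-recursive-span decomposition (objective: alternative; same cost).

-- Python str.isupper(), ported by hand; exact on the ASCII domain, where the cased characters are exactly the letters.
def pvIsupper (cs : List Char) : Bool :=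
  cs.any (fun c => PySem.Chars.islower c || PySem.Chars.isupper c) &&
  cs.all (fun c => !PySem.Chars.islower c)

-- the is_paragraph_break expression, literally the same in A's code and in B's _is_paragraph_break
def pvIsBreak (line : List Char) : Bool :=
  decide (PySem.Chars.len line < 50) ||
  PySem.Chars.endswith line ['.'] ||
  PySem.Chars.endswith line ['!'] ||
  PySem.Chars.endswith line ['?'] ||
  pvIsupper line ||
  (decide ((PySem.Chars.split₀ line).length ≤ 3) && PySem.Chars.endswith line ['.'])

-- ===== PORT A =====
def improve_paragraph_formatting_py (text : String) : String :=
  if text = "" then text else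
  let lines := PySem.Chars.splitOn text.toList ['\n']
  let cleaned_lines := lines.foldl (fun acc line =>
      let line := PySem.Chars.strip line
      if line ≠ [] then acc ++ [PySem.Chars.join [' '] (PySem.Chars.split₀ line)] else acc) []
  let st := cleaned_lines.foldl
      (fun (st : List (List Char) × List (List Char)) line =>
        if pvIsBreak line && !st.2.isEmpty then
          (st.1 ++ [PySem.Chars.join [' '] (st.2 ++ [line])], [])
        else (st.1, st.2 ++ [line])) ([], [])
  let paragraphs := if !st.2.isEmpty then st.1 ++ [PySem.Chars.join [' '] st.2] else st.1
  let result := PySem.Chars.join ['\n', '\n'] paragraphs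
  let result := PySem.Chars.replace result ['\n', '\n', '\n'] ['\n', '\n']
  String.mk (PySem.Chars.strip result)

-- ===== PORT B =====
-- B's _paragraphs: recursive span-based cutting of the flagged lines
def pvParagraphs : List (List Char × Bool) → List (List Char)
  | [] => []
  | head :: rest =>
    let pre := rest.takeWhile (fun p => !p.2)
    match h : rest.dropWhile (fun p => !p.2) with
    | [] => [PySem.Chars.join [' '] (head.1 :: pre.map Prod.fst)]
    | b :: tl =>
      PySem.Chars.join [' '] (head.1 :: (pre.map Prod.fst ++ [b.1])) :: pvParagraphs tl
termination_by l => l.length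
decreasing_by
  have hle := List.length_dropWhile_le (fun (p : List Char × Bool) => !p.2) rest
  rw [h] at hle
  simp at hle ⊢
  omega

def improve_paragraph_formatting_py_alt (text : String) : String :=
  if text = "" then text else
  let cleaned := (((PySem.Chars.splitOn text.toList ['\n']).map PySem.Chars.strip).filter
      (fun s => !s.isEmpty)).map (fun s => PySem.Chars.join [' '] (PySem.Chars.split₀ s))
  let paragraphs := pvParagraphs (cleaned.map (fun s => (s, pvIsBreak s)))
  let result := PySem.Chars.replace (PySem.Chars.join ['\n', '\n'] paragraphs)
      ['\n', '\n', '\n'] ['\n', '\n']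
  String.mk (PySem.Chars.strip result)

-- ===== PRECONDITION & SPEC =====
def Spec_improve_paragraph_formatting_py (text : String) (out : String) : Prop := out = improve_paragraph_formatting_py_alt text
instance (text : String) (out : String) : Decidable (Spec_improve_paragraph_formatting_py text out) := by unfold Spec_improve_paragraph_formatting_py; infer_instance

-- ===== CLAIM (what is proved, stated in full; the proofs are below) =====
def Claim_equal_improve_paragraph_formatting_py : Prop := ∀ (text : String), Dom_improve_paragraph_formatting_py text → Spec_improve_paragraph_formatting_py text (improve_paragraph_formatting_py text)

-- ===== LEMMAS AND PROOFS =====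

-- A's cleaning loop equals B's filter/map pipeline
theorem pv_clean_eq (lines : List (List Char)) (acc : List (List Char)) :
    lines.foldl (fun acc line =>
      let line := PySem.Chars.strip line
      if line ≠ [] then acc ++ [PySem.Chars.join [' '] (PySem.Chars.split₀ line)] else acc) acc
    = acc ++ (((lines.map PySem.Chars.strip).filter
        (fun s => !s.isEmpty)).map (fun s => PySem.Chars.join [' '] (PySem.Chars.split₀ s))) := by
  induction lines generalizing acc with
  | nil => simp
  | cons l ls ih =>
    simp only [List.foldl_cons, ih, List.map_cons, List.filter_cons]
    by_cases h : PySem.Chars.strip l = [] <;> simp [h]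

-- the finalize step of A's grouping loop
def pvFinish (st : List (List Char) × List (List Char)) : List (List Char) :=
  if !st.2.isEmpty then st.1 ++ [PySem.Chars.join [' '] st.2] else st.1

-- the grouping loop read as a recursion over the remaining lines with the pending accumulator
def pvGacc (acc : List (List Char)) : List (List Char) → List (List Char)
  | [] => if !acc.isEmpty then [PySem.Chars.join [' '] acc] else []
  | l :: ls =>
    if pvIsBreak l && !acc.isEmpty then
      PySem.Chars.join [' '] (acc ++ [l]) :: pvGacc [] ls
    else pvGacc (acc ++ [l]) ls

theorem pv_fold_gacc (ls : List (List Char)) (P acc : List (List Char)) :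
    pvFinish (ls.foldl
      (fun (st : List (List Char) × List (List Char)) line =>
        if pvIsBreak line && !st.2.isEmpty then
          (st.1 ++ [PySem.Chars.join [' '] (st.2 ++ [line])], [])
        else (st.1, st.2 ++ [line])) (P, acc))
    = P ++ pvGacc acc ls := by
  induction ls generalizing P acc with
  | nil => simp [pvFinish, pvGacc]; split <;> simp
  | cons l ls ih =>
    rw [List.foldl_cons]
    simp only []
    by_cases hcond : (pvIsBreak l && !acc.isEmpty) = true
    · rw [if_pos hcond, ih]
      simp only [pvGacc, if_pos hcond, List.append_assoc, List.singleton_append]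
    · rw [if_neg hcond, ih]
      simp only [pvGacc, if_neg hcond]

theorem pv_gacc_nonempty (ls : List (List Char)) (acc : List (List Char)) (h : acc ≠ []) :
    pvGacc acc ls =
      match ls.dropWhile (fun l => !pvIsBreak l) with
      | [] => [PySem.Chars.join [' '] (acc ++ ls.takeWhile (fun l => !pvIsBreak l))]
      | b :: tl =>
        PySem.Chars.join [' '] (acc ++ ls.takeWhile (fun l => !pvIsBreak l) ++ [b]) :: pvGacc [] tl := by
  induction ls generalizing acc with
  | nil => simp [pvGacc, h]
  | cons l ls ih =>
    by_cases hb : pvIsBreak l = true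
    · simp [pvGacc, hb, h, List.dropWhile_cons, List.takeWhile_cons]
    · have hb' : pvIsBreak l = false := by simp [hb]
      have e : pvGacc acc (l :: ls) = pvGacc (acc ++ [l]) ls := by
        simp [pvGacc, hb']
      rw [e, ih (acc ++ [l]) (by simp)]
      simp only [List.dropWhile_cons, List.takeWhile_cons, hb', Bool.not_false, if_true]
      cases hd : ls.dropWhile (fun l => !pvIsBreak l) <;> simp [hd]

theorem pv_gacc_paras (n : Nat) (ls : List (List Char)) (hn : ls.length ≤ n) :
    pvGacc [] ls = pvParagraphs (ls.map (fun s => (s, pvIsBreak s))) := by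
  induction n generalizing ls with
  | zero =>
    have : ls = [] := by cases ls <;> simp_all
    simp [this, pvGacc, pvParagraphs]
  | succ n ih =>
    cases ls with
    | nil => simp [pvGacc, pvParagraphs]
    | cons l ls =>
      have h1 : pvGacc [] (l :: ls) = pvGacc [l] ls := by simp [pvGacc]
      rw [h1, pv_gacc_nonempty ls [l] (by simp)]
      rw [pvParagraphs.eq_def]
      simp only [List.map_cons]
      have hm : List.dropWhile (fun p : List Char × Bool => !p.2)
            (ls.map (fun s => (s, pvIsBreak s)))
          = (ls.dropWhile (fun l => !pvIsBreak l)).map (fun s => (s, pvIsBreak s)) := by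
        simp [List.dropWhile_map, Function.comp_def]
      cases hq : ls.dropWhile (fun l => !pvIsBreak l) with
      | nil =>
        simp only [hq]
        split
        next heq => simp [List.takeWhile_map, Function.comp_def]
        next b' tl' heq => rw [hm, hq] at heq; simp at heq
      | cons b tl =>
        simp only [hq]
        split
        next heq => rw [hm, hq] at heq; simp at heq
        next b' tl' heq =>
          rw [hm, hq] at heq
          simp only [List.map_cons, List.cons.injEq] at heq
          obtain ⟨hb', htl'⟩ := heq
          have htl : tl.length ≤ n := by
            have hle := List.length_dropWhile_le (fun l => !pvIsBreak l) ls
            rw [hq] at hle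
            simp at hle hn
            omega
          simp [← hb', ← htl', ih tl htl, List.takeWhile_map, Function.comp_def]

-- A's grouping loop + finalize equals B's recursive cutting
theorem pv_group_eq (cleaned : List (List Char)) :
    (let st := cleaned.foldl
      (fun (st : List (List Char) × List (List Char)) line =>
        if pvIsBreak line && !st.2.isEmpty then
          (st.1 ++ [PySem.Chars.join [' '] (st.2 ++ [line])], [])
        else (st.1, st.2 ++ [line])) ([], []);
     if !st.2.isEmpty then st.1 ++ [PySem.Chars.join [' '] st.2] else st.1)
    = pvParagraphs (cleaned.map (fun s => (s, pvIsBreak s))) := by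
  show pvFinish _ = _
  rw [pv_fold_gacc cleaned [] []]
  simpa using pv_gacc_paras cleaned.length cleaned le_rfl

-- ===== VERDICT (by name: the statement is the Claim_ definition above) =====
theorem improve_paragraph_formatting_py_spec : Claim_equal_improve_paragraph_formatting_py := by
  intro text _
  unfold Spec_improve_paragraph_formatting_py
  unfold improve_paragraph_formatting_py improve_paragraph_formatting_py_alt
  by_cases h : text = ""
  · rw [if_pos h, if_pos h]
  · rw [if_neg h, if_neg h]
    simp only [pv_clean_eq, List.nil_append]
    rw [pv_group_eq]
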